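-- pv_equiv track=rewrite | github.com/vpArth/so_tasks | 1193031.py | solution
-- ===== SOURCE A (Python) =====
-- def solution(inp):
--     pattern = inp[0]
--     for i, l in enumerate(inp[1:]):
--         replacement = []
--         for j, e in enumerate(pattern):
--             expected = f'{e[0]}{i+2}'
--             replacement.append(expected if expected in l else e)
--         l[:] = replacement
--         pattern = l
--
--     return inp
-- ===== SOURCE B (Python) =====
-- def solution(inp):
--     # Column-major rewrite: the fixed char for column j is inp[0][j][0], so each
--     # column's values can be computed in one downward walk over precomputed
--     # membership sets of the ORIGINAL rows; rows are then written back in place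
--     # (reshaped to len(inp[0]), like A).
--     if len(inp) < 2:
--         return inp
--     head = inp[0]
--     sets = [set(r) for r in inp[1:]]
--     cols = []
--     for v in head:
--         c = v[0]
--         col = []
--         for i, s in enumerate(sets):
--             cand = c + str(i + 2)
--             if cand in s:
--                 v = cand
--             col.append(v)
--         cols.append(col)
--     for i, l in enumerate(inp[1:]):
--         l[:] = [col[i] for col in cols]
--     return inp
-- ===== Notes on version B (the rewrite author's own statement) =====
-- stated objective: faster
-- what changed: Row-major rewrite with an evolving pattern and 'expected in l' list scans is replaced by a column-major dependent walk: since column j's candidate char is fixed (inp[0][j][0]), each column is computed in one downward pass over precomputed membership sets of the original rows, then rows are written back.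
import Mathlib
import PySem

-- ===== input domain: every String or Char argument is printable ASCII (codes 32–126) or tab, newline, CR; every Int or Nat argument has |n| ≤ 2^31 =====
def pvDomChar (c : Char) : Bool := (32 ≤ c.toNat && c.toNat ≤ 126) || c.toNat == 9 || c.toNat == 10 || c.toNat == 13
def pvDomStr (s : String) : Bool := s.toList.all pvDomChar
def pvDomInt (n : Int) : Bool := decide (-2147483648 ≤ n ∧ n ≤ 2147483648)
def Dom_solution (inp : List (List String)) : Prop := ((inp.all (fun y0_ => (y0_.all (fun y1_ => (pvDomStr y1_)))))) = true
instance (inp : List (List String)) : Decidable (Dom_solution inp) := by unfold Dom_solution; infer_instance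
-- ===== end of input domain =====

-- ===== PORT A =====
-- B rewrites the grid column-major over precomputed sets instead of row-major
-- with an evolving pattern (objective: alternative). Return-value equivalence
-- only: the Python A (and B) also mutate the argument rows in place.

-- e[0] as a Char (under Pre_ every string indexed this way is nonempty, so
-- pyGet? is some; the ' ' default is never reached there)
def pvFc (s : String) : Char := (PySem.Str.pyGet? s 0).getD ' '

-- loop 'for i, l in enumerate(inp[1:])' with body building 'replacement' from
-- 'pattern' and then 'l[:] = replacement; pattern = l'
def solutionLoop (pattern : List String) (i : Int) : List (List String) → List (List String)
  | [] => []
  | l :: t =>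
    let repl := pattern.map (fun e =>
      let expected := String.ofList (pvFc e :: PySem.Int.toChars (i + 2))  -- f'{e[0]}{i+2}'
      if expected ∈ l then expected else e)
    repl :: solutionLoop repl (i + 1) t

def solution (inp : List (List String)) : List (List String) :=
  match inp with
  | [] => []  -- Python raises IndexError (inp[0]) here; excluded by Pre_solution
  | r0 :: rest => r0 :: solutionLoop r0 0 rest

-- ===== PORT B =====
-- inner walk of Source B: for i, s in enumerate(sets): cand = c + str(i+2); if cand in s: v = cand; col.append(v)
def solutionCol (c : Char) (v : String) (i : Int) : List (PySem.Set String) → List String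
  | [] => []
  | s :: t =>
    let cand := String.ofList (c :: PySem.Int.toChars (i + 2))
    let v' := if PySem.Set.contains s cand then cand else v
    v' :: solutionCol c v' (i + 1) t

def solution_alt (inp : List (List String)) : List (List String) :=
  match inp with
  | [] => []          -- len(inp) < 2: return inp
  | [r0] => [r0]      -- len(inp) < 2: return inp
  | r0 :: rest =>
    let sets := rest.map (fun r => PySem.Set.ofList r)
    let cols := r0.map (fun v => solutionCol (pvFc v) v 0 sets)
    r0 :: (List.range rest.length).map (fun i => cols.map (fun col => col.getD i ""))

-- ===== PRECONDITION & SPEC =====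
-- Pre_ excludes exactly the inputs where the Python A raises IndexError: the
-- empty list (inp[0]) and grids with at least two rows whose first row contains
-- an empty string (e[0]).
def Pre_solution (inp : List (List String)) : Prop :=
  inp ≠ [] ∧ (inp.length ≤ 1 ∨ ∀ s ∈ inp.headI, s ≠ "")
instance (inp : List (List String)) : Decidable (Pre_solution inp) := by unfold Pre_solution; infer_instance
def pvWitness_solution : List (List String) := [["a1", "b1"], ["a2", "x"], ["b4", "a3"]]

def Spec_solution (inp : List (List String)) (out : List (List String)) : Prop := out = solution_alt inp
instance (inp : List (List String)) (out : List (List String)) : Decidable (Spec_solution inp out) := by unfold Spec_solution; infer_instance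

-- ===== CLAIM (what is proved, stated in full; the proofs are below) =====
def Claim_equal_solution : Prop := ∀ (inp : List (List String)), Dom_solution inp → Pre_solution inp → Spec_solution inp (solution inp)

-- ===== LEMMAS AND PROOFS =====

-- the first char of a candidate string is the fixed column char
theorem pvFc_cand (c : Char) (cs : List Char) : pvFc (String.ofList (c :: cs)) = c := by
  simp [pvFc, pysem]

-- key row-major / column-major bridge: A's loop is the transpose of B's columns
theorem pv_bridge : ∀ (rows : List (List String)) (pattern : List String) (i : Int),
    solutionLoop pattern i rows =
      (List.range rows.length).map (fun k =>
        pattern.map (fun v =>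
          (solutionCol (pvFc v) v i (rows.map (fun r => PySem.Set.ofList r))).getD k "")) := by
  intro rows
  induction rows with
  | nil => intro pattern i; simp [solutionLoop]
  | cons l t ih =>
    intro pattern i
    simp only [solutionLoop, List.length_cons, List.range_succ_eq_map, List.map_cons,
      List.map_map]
    rw [List.cons_eq_cons]
    refine ⟨?_, ?_⟩
    · -- row 0: one step of each column walk
      apply List.map_congr_left
      intro e _
      by_cases h : String.ofList (pvFc e :: PySem.Int.toChars (i + 2)) ∈ l
      · simp [solutionCol, h]
      · simp [solutionCol, h]
    · -- remaining rows: IH on the new pattern, then peel one step off each column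
      rw [ih]
      apply List.map_congr_left
      intro k _
      simp only [Function.comp_apply, List.map_map]
      apply List.map_congr_left
      intro e _
      simp only [Function.comp_apply]
      by_cases h : String.ofList (pvFc e :: PySem.Int.toChars (i + 2)) ∈ l
      · simp [solutionCol, h, pvFc_cand]
      · simp [solutionCol, h]

-- ===== VERDICT (by name: the statement is the Claim_ definition above) =====
theorem solution_spec : Claim_equal_solution := by
  intro inp _ _
  unfold Spec_solution
  match inp with
  | [] => rfl
  | [r0] => simp [solution, solution_alt, solutionLoop]
  | r0 :: l :: t =>
    simp only [solution, solution_alt]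
    rw [pv_bridge]
    simp [List.map_map]
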